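-- pv_equiv track=rewrite | github.com/twodogs-wang/inf552 | hw7_hmm/hmm.py | __get_possible_steps_per_cell
-- ===== SOURCE A (Python) =====
-- from typing import List
--
-- def __get_possible_steps_per_cell(_dict: dict,free_cells:List[tuple]):
--     """
--     input:
--     _dict: dict which stores possible cells for each time step
--     free_cells: coordinates for all free cells
--
--     output:
--     possible states for each cells in a dict, for future quick access
--     """
--     _ans = {}
--     for cell in free_cells:
--         _ans[cell] = []
--         for step in list(_dict.keys()):
--             if cell in _dict[step]:
--                 _ans[cell].append(step)
--
--     for key in list(_ans.keys()):
--         if _ans[key] == []: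
--             del _ans[key]
--     return _ans
-- ===== SOURCE B (Python) =====
-- def __get_possible_steps_per_cell(_dict, free_cells):
--     # One pass over each step's cell list builds an inverted index cell -> steps,
--     # then the result keeps free cells (in order) that have at least one step.
--     index = {}
--     for step, cells in _dict.items():
--         for cell in cells:
--             lst = index.get(cell)
--             if lst is None:
--                 index[cell] = [step]
--             elif lst[-1] != step:
--                 lst.append(step)
--     return {cell: index[cell] for cell in free_cells if cell in index}
-- ===== Notes on version B (the rewrite author's own statement) =====
-- stated objective: faster
-- what changed: Instead of scanning every step's cell list once per free cell, B builds an inverted index cell->steps in one pass over the dict's entries and then emits free cells that occur in the index.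
import Mathlib
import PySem

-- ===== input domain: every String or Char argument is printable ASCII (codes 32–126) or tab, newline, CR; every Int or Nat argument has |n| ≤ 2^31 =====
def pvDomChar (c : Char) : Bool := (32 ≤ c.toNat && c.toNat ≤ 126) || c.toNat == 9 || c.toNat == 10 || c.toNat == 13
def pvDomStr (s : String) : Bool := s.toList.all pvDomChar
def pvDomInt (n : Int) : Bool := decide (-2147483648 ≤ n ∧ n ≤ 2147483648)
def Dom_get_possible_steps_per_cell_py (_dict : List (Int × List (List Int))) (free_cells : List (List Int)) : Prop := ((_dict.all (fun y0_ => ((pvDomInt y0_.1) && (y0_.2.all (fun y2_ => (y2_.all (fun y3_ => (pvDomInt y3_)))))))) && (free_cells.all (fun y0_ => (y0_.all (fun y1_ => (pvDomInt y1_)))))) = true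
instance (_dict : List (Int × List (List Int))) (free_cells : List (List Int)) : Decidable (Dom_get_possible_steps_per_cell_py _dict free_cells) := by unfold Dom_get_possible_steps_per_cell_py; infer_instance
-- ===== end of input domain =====

-- B replaces A's per-free-cell scan of every step's cell list by a single-pass inverted index
-- (cell -> steps) over the dict's entries; same return value, asymptotically fewer list scans.

-- ===== PORT A =====
-- inner loop: 'for step in list(_dict.keys()): if cell in _dict[step]: _ans[cell].append(step)'
-- (_dict[step] is read with getD: step comes from _dict.keys, so the key is always present)
def pvA_inner (d : PySem.Dict Int (List (List Int))) (cell : List Int)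
    (ans : PySem.Dict (List Int) (List Int)) : PySem.Dict (List Int) (List Int) :=
  d.keys.foldl (fun ans step =>
    if cell ∈ d.getD step [] then ans.modify cell [] (· ++ [step]) else ans) ans

-- first loop: '_ans[cell] = []' then the inner loop, for each free cell
def pvA_phase1 (d : PySem.Dict Int (List (List Int))) (free_cells : List (List Int)) :
    PySem.Dict (List Int) (List Int) :=
  free_cells.foldl (fun ans cell => pvA_inner d cell (ans.insert cell [])) PySem.Dict.empty

-- second loop: 'for key in list(_ans.keys()): if _ans[key] == []: del _ans[key]'
def pvA_phase2 (ans : PySem.Dict (List Int) (List Int)) : PySem.Dict (List Int) (List Int) :=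
  ans.keys.foldl (fun acc key => if acc.getD key [] = [] then acc.erase key else acc) ans

def get_possible_steps_per_cell_py (_dict : List (Int × List (List Int))) (free_cells : List (List Int)) : List (List Int × List Int) :=
  (pvA_phase2 (pvA_phase1 (PySem.Dict.ofList _dict) free_cells)).items

-- ===== PORT B =====
-- 'lst = index.get(cell); if lst is None: index[cell] = [step]; elif lst[-1] != step: lst.append(step)'
def pvB_innerStep (step : Int) (idx : PySem.Dict (List Int) (List Int)) (cell : List Int) :
    PySem.Dict (List Int) (List Int) :=
  match idx.get? cell with
  | none => idx.insert cell [step]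
  | some lst => if lst.getLast? ≠ some step then idx.insert cell (lst ++ [step]) else idx

-- 'for step, cells in _dict.items(): for cell in cells: …'
def pvB_index (items : List (Int × List (List Int))) : PySem.Dict (List Int) (List Int) :=
  items.foldl (fun idx p => p.2.foldl (pvB_innerStep p.1) idx) PySem.Dict.empty

-- '{cell: index[cell] for cell in free_cells if cell in index}'
def get_possible_steps_per_cell_py_alt (_dict : List (Int × List (List Int))) (free_cells : List (List Int)) : List (List Int × List Int) :=
  let index := pvB_index (PySem.Dict.ofList _dict).items
  (free_cells.foldl (fun out cell =>
    match index.get? cell with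
    | some lst => out.insert cell lst
    | none => out) PySem.Dict.empty).items

-- ===== PRECONDITION & SPEC =====
def Spec_get_possible_steps_per_cell_py (_dict : List (Int × List (List Int))) (free_cells : List (List Int)) (out : List (List Int × List Int)) : Prop := out = get_possible_steps_per_cell_py_alt _dict free_cells
instance (_dict : List (Int × List (List Int))) (free_cells : List (List Int)) (out : List (List Int × List Int)) : Decidable (Spec_get_possible_steps_per_cell_py _dict free_cells out) := by unfold Spec_get_possible_steps_per_cell_py; infer_instance

-- ===== CLAIM (what is proved, stated in full; the proofs are below) =====
def Claim_equal_get_possible_steps_per_cell_py : Prop := ∀ (_dict : List (Int × List (List Int))) (free_cells : List (List Int)), Dom_get_possible_steps_per_cell_py _dict free_cells → Spec_get_possible_steps_per_cell_py _dict free_cells (get_possible_steps_per_cell_py _dict free_cells)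

-- ===== LEMMAS AND PROOFS =====

def pvS (items : List (Int × List (List Int))) (c : List Int) : List Int :=
  (items.filter (fun p => decide (c ∈ p.2))).map (·.1)

theorem pv_find?_filter_ne (l : List ((List Int) × List Int)) (k x : List Int) :
    (l.filter (fun p => !(p.1 == k))).find? (fun p => p.1 == x)
      = if x = k then none else l.find? (fun p => p.1 == x) := by
  induction l with
  | nil => simp
  | cons p t ih =>
    rw [List.filter_cons]
    by_cases hk : p.1 = k
    · have h1 : (!(p.1 == k)) = false := by simp [hk]
      rw [h1, if_neg (by simp), ih]
      by_cases hx : x = k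
      · simp [hx]
      · rw [if_neg hx, if_neg hx, List.find?_cons]
        have : (p.1 == x) = false := by simp [hk]; exact fun h => hx h.symm
        rw [this]
    · have h1 : (!(p.1 == k)) = true := by simp [hk]
      rw [h1, if_pos rfl, List.find?_cons, List.find?_cons]
      by_cases hx : p.1 = x
      · have : (p.1 == x) = true := by simp [hx]
        rw [this]
        have hxk : ¬ x = k := fun h => hk (hx ▸ h)
        simp [hxk]
      · have : (p.1 == x) = false := by simp [hx]
        rw [this, ih]

theorem pv_get?_erase (d : PySem.Dict (List Int) (List Int)) (k x : List Int) :
    (d.erase k).get? x = if x = k then none else d.get? x := by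
  show ((d.items.filter (fun p => !(p.1 == k))).find? (fun p => p.1 == x)).map (·.2) = _
  rw [pv_find?_filter_ne]
  split <;> rfl

theorem pv_keys_erase (d : PySem.Dict (List Int) (List Int)) (k : List Int) :
    (d.erase k).keys = d.keys.filter (fun x => !(x == k)) := by
  show (d.items.filter (fun p => !(p.1 == k))).map (·.1) = (d.items.map (·.1)).filter _
  rw [List.filter_map]
  rfl

theorem pv_stepsK_eq (d : PySem.Dict Int (List (List Int))) (hnd : d.keys.Nodup) (c : List Int) :
    d.keys.filter (fun k => decide (c ∈ d.getD k [])) = pvS d.items c := by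
  show (d.items.map (·.1)).filter _ = _
  rw [List.filter_map]
  unfold pvS
  congr 1
  apply List.filter_congr
  intro p hp
  simp only [Function.comp]
  have hg : d.getD p.1 [] = p.2 :=
    PySem.Dict.getD_of_mem_items d (show (p.1, p.2) ∈ d.items from by simpa using hp) hnd []
  rw [hg]

theorem pvA_innerAux_get? (d : PySem.Dict Int (List (List Int))) (c : List Int) :
    ∀ (ks : List Int) (a : PySem.Dict (List Int) (List Int)), a.contains c = true → ∀ x,
      (ks.foldl (fun ans step => if c ∈ d.getD step [] then ans.modify c [] (· ++ [step]) else ans) a).get? x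
        = if x = c then some (a.getD c [] ++ ks.filter (fun k => decide (c ∈ d.getD k []))) else a.get? x := by
  intro ks
  induction ks with
  | nil =>
    intro a h x
    simp only [List.foldl_nil, List.filter_nil, List.append_nil]
    split
    · next hx =>
      subst hx
      rw [PySem.Dict.getD_eq_get?_getD]
      cases hg : a.get? x with
      | none =>
        exfalso
        rw [PySem.Dict.contains_eq_isSome_get?, hg] at h
        simp at h
      | some v => rfl
    · rfl
  | cons k t ih =>
    intro a h x
    rw [List.foldl_cons]
    by_cases hc : c ∈ d.getD k []
    · rw [if_pos hc]
      have h2 : (a.modify c [] (· ++ [k])).contains c = true := by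
        simp [PySem.Dict.modify, PySem.Dict.contains_insert_self]
      rw [ih _ h2 x]
      by_cases hx : x = c
      · rw [if_pos hx, if_pos hx]
        have hg : (a.modify c [] (· ++ [k])).getD c [] = a.getD c [] ++ [k] := by
          simp [PySem.Dict.modify, PySem.Dict.getD_insert_self]
        rw [hg, List.filter_cons]
        simp [hc, List.append_assoc]
      · rw [if_neg hx, if_neg hx]
        simp [PySem.Dict.modify, PySem.Dict.get?_insert, hx]
    · rw [if_neg hc, ih _ h x, List.filter_cons]
      simp [hc]

theorem pvA_innerAux_keys (d : PySem.Dict Int (List (List Int))) (c : List Int) :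
    ∀ (ks : List Int) (a : PySem.Dict (List Int) (List Int)), a.contains c = true →
      (ks.foldl (fun ans step => if c ∈ d.getD step [] then ans.modify c [] (· ++ [step]) else ans) a).keys
        = a.keys := by
  intro ks
  induction ks with
  | nil => intro a h; rfl
  | cons k t ih =>
    intro a h
    rw [List.foldl_cons]
    by_cases hc : c ∈ d.getD k []
    · rw [if_pos hc]
      have h2 : (a.modify c [] (· ++ [k])).contains c = true := by
        simp [PySem.Dict.modify, PySem.Dict.contains_insert_self]
      rw [ih _ h2]
      exact PySem.Dict.keys_insert_of_contains a _ h
    · rw [if_neg hc, ih _ h]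

theorem pvA_phase1_inv (d : PySem.Dict Int (List (List Int))) :
    ∀ (fc pr : List (List Int)) (a : PySem.Dict (List Int) (List Int)),
      (∀ x, a.get? x = if x ∈ pr then some (d.keys.filter (fun k => decide (x ∈ d.getD k []))) else none) →
      a.keys = PySem.Set.ofList pr →
      (∀ x, (fc.foldl (fun ans cell => pvA_inner d cell (ans.insert cell [])) a).get? x
          = if x ∈ pr ++ fc then some (d.keys.filter (fun k => decide (x ∈ d.getD k []))) else none)
      ∧ (fc.foldl (fun ans cell => pvA_inner d cell (ans.insert cell [])) a).keys = PySem.Set.ofList (pr ++ fc) := by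
  intro fc
  induction fc with
  | nil =>
    intro pr a hget hkeys
    simpa using ⟨hget, hkeys⟩
  | cons c t ih =>
    intro pr a hget hkeys
    rw [List.foldl_cons]
    have hcont : (a.insert c []).contains c = true := PySem.Dict.contains_insert_self a c []
    have hget1 : ∀ x, (pvA_inner d c (a.insert c [])).get? x
        = if x ∈ pr ++ [c] then some (d.keys.filter (fun k => decide (x ∈ d.getD k []))) else none := by
      intro x
      unfold pvA_inner
      rw [pvA_innerAux_get? d c d.keys _ hcont x]
      by_cases hx : x = c
      · subst hx
        rw [if_pos rfl, PySem.Dict.getD_insert_self]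
        simp
      · rw [if_neg hx, PySem.Dict.get?_insert, if_neg hx, hget x]
        have : (x ∈ pr ++ [c]) ↔ x ∈ pr := by simp [hx]
        by_cases hm : x ∈ pr
        · rw [if_pos hm, if_pos (this.mpr hm)]
        · rw [if_neg hm, if_neg (fun h => hm (this.mp h))]
    have hkeys1 : (pvA_inner d c (a.insert c [])).keys = PySem.Set.ofList (pr ++ [c]) := by
      unfold pvA_inner
      rw [pvA_innerAux_keys d c d.keys _ hcont]
      rw [PySem.Set.ofList_append]
      show (a.insert c []).keys = PySem.Set.add (PySem.Set.ofList pr) c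
      by_cases hm : c ∈ PySem.Set.ofList pr
      · have hc : a.contains c = true := by
          rw [PySem.Dict.contains_eq_decide_mem_keys, hkeys]
          simpa using hm
        rw [PySem.Dict.keys_insert_of_contains a _ hc, hkeys]
        simp [PySem.Set.add, hm]
      · have hc : a.contains c = false := by
          rw [PySem.Dict.contains_eq_decide_mem_keys, hkeys]
          simpa using hm
        rw [PySem.Dict.keys_insert_of_not_contains a _ hc, hkeys]
        simp [PySem.Set.add]
        intro h
        exact absurd (by simpa [List.contains_iff_mem] using h) hm
    have := ih (pr ++ [c]) _ hget1 hkeys1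
    simpa [List.append_assoc] using this

theorem pvA_phase2_get? :
    ∀ (ks : List (List Int)) (acc : PySem.Dict (List Int) (List Int)) (x : List Int),
      (ks.foldl (fun acc key => if acc.getD key [] = [] then acc.erase key else acc) acc).get? x
        = if x ∈ ks ∧ acc.getD x [] = [] then none else acc.get? x := by
  intro ks
  induction ks with
  | nil => intro acc x; simp
  | cons k t ih =>
    intro acc x
    rw [List.foldl_cons]
    by_cases h : acc.getD k [] = []
    · rw [if_pos h, ih]
      by_cases hx : x = k
      · subst hx
        have e1 : (acc.erase x).get? x = none := by rw [pv_get?_erase]; simp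
        have e2 : (acc.erase x).getD x [] = [] := by
          rw [PySem.Dict.getD_eq_get?_getD, e1]; rfl
        rw [e1, e2]
        simp [h]
      · have e1 : (acc.erase k).get? x = acc.get? x := by rw [pv_get?_erase]; simp [hx]
        have e2 : (acc.erase k).getD x [] = acc.getD x [] := by
          rw [PySem.Dict.getD_eq_get?_getD, e1, ← PySem.Dict.getD_eq_get?_getD]
        rw [e1, e2]
        simp [hx]
    · rw [if_neg h, ih]
      by_cases hx : x = k
      · subst hx; simp [h]
      · simp [hx]

theorem pvA_phase2_keys :
    ∀ (ks : List (List Int)) (acc : PySem.Dict (List Int) (List Int)),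
      (ks.foldl (fun acc key => if acc.getD key [] = [] then acc.erase key else acc) acc).keys
        = acc.keys.filter (fun x => !(decide (x ∈ ks) && decide (acc.getD x [] = []))) := by
  intro ks
  induction ks with
  | nil => intro acc; simp
  | cons k t ih =>
    intro acc
    rw [List.foldl_cons]
    by_cases h : acc.getD k [] = []
    · rw [if_pos h, ih, pv_keys_erase, List.filter_filter]
      apply List.filter_congr
      intro x hx
      by_cases hxk : x = k
      · subst hxk; simp [h]
      · have e2 : (acc.erase k).getD x [] = acc.getD x [] := by
          rw [PySem.Dict.getD_eq_get?_getD, pv_get?_erase, if_neg hxk, ← PySem.Dict.getD_eq_get?_getD]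
        simp [hxk, e2]
    · rw [if_neg h, ih]
      apply List.filter_congr
      intro x hx
      by_cases hxk : x = k
      · subst hxk; simp [h]
      · simp [hxk]

theorem pvB_inner_inv (k : Int) :
    ∀ (v : List (List Int)) (idx : PySem.Dict (List Int) (List Int)) (g : List Int → List Int),
      (∀ x, idx.get? x = if g x = [] then none else some (g x)) →
      (∀ x, k ∈ g x ↔ (g x).getLast? = some k) →
      ∀ x, (v.foldl (pvB_innerStep k) idx).get? x
        = if (g x ++ if x ∈ v ∧ k ∉ g x then [k] else []) = [] then none
          else some (g x ++ if x ∈ v ∧ k ∉ g x then [k] else []) := by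
  intro v
  induction v with
  | nil =>
    intro idx g h1 h2 x
    simpa using h1 x
  | cons c t ih =>
    intro idx g h1 h2 x
    rw [List.foldl_cons]
    have hstep : pvB_innerStep k idx c
        = if k ∈ g c then idx else idx.insert c (g c ++ [k]) := by
      unfold pvB_innerStep
      rw [h1 c]
      by_cases hc : g c = []
      · rw [if_pos hc]
        have hknot : ¬ k ∈ g c := by rw [hc]; simp
        rw [if_neg hknot, hc]
        rfl
      · rw [if_neg hc]
        show (if (g c).getLast? ≠ some k then idx.insert c (g c ++ [k]) else idx)
            = if k ∈ g c then idx else idx.insert c (g c ++ [k])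
        by_cases hk : k ∈ g c
        · have : ¬ ((g c).getLast? ≠ some k) := by simp [(h2 c).mp hk]
          rw [if_neg this, if_pos hk]
        · have : (g c).getLast? ≠ some k := fun h => hk ((h2 c).mpr h)
          rw [if_pos this, if_neg hk]
    have hg' : ∀ y, (pvB_innerStep k idx c).get? y
        = if (if y = c then (if k ∈ g c then g c else g c ++ [k]) else g y) = [] then none
          else some (if y = c then (if k ∈ g c then g c else g c ++ [k]) else g y) := by
      intro y
      rw [hstep]
      by_cases hk : k ∈ g c
      · rw [if_pos hk, h1 y]
        by_cases hy : y = c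
        · subst hy; rw [if_pos rfl, if_pos hk]
        · rw [if_neg hy]
      · rw [if_neg hk, PySem.Dict.get?_insert]
        by_cases hy : y = c
        · subst hy
          rw [if_pos rfl, if_pos rfl, if_neg hk]
          simp
        · rw [if_neg hy, if_neg hy, h1 y]
    have hm' : ∀ y, k ∈ (if y = c then (if k ∈ g c then g c else g c ++ [k]) else g y)
        ↔ (if y = c then (if k ∈ g c then g c else g c ++ [k]) else g y).getLast? = some k := by
      intro y
      by_cases hy : y = c
      · rw [if_pos hy]
        by_cases hk : k ∈ g c
        · rw [if_pos hk]; exact h2 c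
        · rw [if_neg hk]
          simp
      · rw [if_neg hy]; exact h2 y
    rw [ih _ _ hg' hm' x]
    have hcomp : ((if x = c then (if k ∈ g c then g c else g c ++ [k]) else g x)
          ++ if x ∈ t ∧ k ∉ (if x = c then (if k ∈ g c then g c else g c ++ [k]) else g x) then [k] else [])
        = g x ++ if x ∈ c :: t ∧ k ∉ g x then [k] else [] := by
      by_cases hx : x = c
      · subst hx
        by_cases hk : k ∈ g x
        · simp [hk]
        · rw [if_pos rfl, if_neg hk]
          have : ¬ (x ∈ t ∧ k ∉ g x ++ [k]) := by simp
          rw [if_neg this]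
          have : (x ∈ x :: t ∧ k ∉ g x) := ⟨List.mem_cons_self, hk⟩
          rw [if_pos this, List.append_nil]
      · rw [if_neg hx]
        have : (x ∈ c :: t) ↔ x ∈ t := by simp [hx]
        by_cases hm : x ∈ t ∧ k ∉ g x
        · rw [if_pos hm, if_pos ⟨this.mpr hm.1, hm.2⟩]
        · rw [if_neg hm, if_neg (fun h => hm ⟨this.mp h.1, h.2⟩)]
    rw [hcomp]

theorem pvB_index_inv :
    ∀ (its : List (Int × List (List Int))) (idx : PySem.Dict (List Int) (List Int)) (g : List Int → List Int),
      (∀ x, idx.get? x = if g x = [] then none else some (g x)) →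
      (∀ x k, k ∈ g x → k ∉ its.map (·.1)) →
      (its.map (·.1)).Nodup →
      ∀ x, (its.foldl (fun idx p => p.2.foldl (pvB_innerStep p.1) idx) idx).get? x
        = if (g x ++ pvS its x) = [] then none else some (g x ++ pvS its x) := by
  intro its
  induction its with
  | nil =>
    intro idx g h1 _ _ x
    simpa [pvS] using h1 x
  | cons p t ih =>
    intro idx g h1 hf hnd x
    rw [List.foldl_cons]
    have h2 : ∀ y, p.1 ∈ g y ↔ (g y).getLast? = some p.1 := by
      intro y
      constructor
      · intro hm; exact absurd (by simp : p.1 ∈ (p :: t).map (·.1)) (hf y p.1 hm)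
      · intro hl
        obtain ⟨ys, hys⟩ := List.getLast?_eq_some_iff.mp hl
        exact absurd (by simp : p.1 ∈ (p :: t).map (·.1)) (hf y p.1 (by rw [hys]; simp))
    have h1' : ∀ y, (p.2.foldl (pvB_innerStep p.1) idx).get? y
        = if (g y ++ if y ∈ p.2 then [p.1] else []) = [] then none
          else some (g y ++ if y ∈ p.2 then [p.1] else []) := by
      intro y
      rw [pvB_inner_inv p.1 p.2 idx g h1 h2 y]
      have he : (if y ∈ p.2 ∧ p.1 ∉ g y then [p.1] else []) = (if y ∈ p.2 then [p.1] else []) := by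
        by_cases hm : y ∈ p.2
        · have hng : p.1 ∉ g y := fun hmm =>
            absurd (by simp : p.1 ∈ (p :: t).map (·.1)) (hf y p.1 hmm)
          simp [hm, hng]
        · simp [hm]
      rw [he]
    have hf' : ∀ y k, k ∈ (g y ++ if y ∈ p.2 then [p.1] else []) → k ∉ t.map (·.1) := by
      intro y k hk hmem
      rcases List.mem_append.mp hk with h | h
      · exact hf y k h (by simp [List.mem_cons]; right; simpa using hmem)
      · have hkp : k = p.1 := by
          by_cases hm : y ∈ p.2 <;> simp [hm] at h
          exact h
        rw [List.map_cons, List.nodup_cons] at hnd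
        exact hnd.1 (hkp ▸ hmem)
    have hnd' : (t.map (·.1)).Nodup := by
      rw [List.map_cons, List.nodup_cons] at hnd
      exact hnd.2
    rw [ih _ _ h1' hf' hnd' x]
    have hcomp : (g x ++ if x ∈ p.2 then [p.1] else []) ++ pvS t x = g x ++ pvS (p :: t) x := by
      rw [List.append_assoc]
      congr 1
      unfold pvS
      rw [List.filter_cons]
      by_cases hm : x ∈ p.2
      · simp [hm]
      · simp [hm]
    rw [hcomp]

theorem pvB_index_get? (its : List (Int × List (List Int))) (hnd : (its.map (·.1)).Nodup) (x : List Int) :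
    (its.foldl (fun idx p => p.2.foldl (pvB_innerStep p.1) idx) PySem.Dict.empty).get? x
      = if pvS its x = [] then none else some (pvS its x) := by
  have h := pvB_index_inv its PySem.Dict.empty (fun _ => [])
    (by intro y; simp [PySem.Dict.get?_empty]) (by intro y k h; simp at h) hnd x
  simpa using h

theorem pvB_out_get? (idx : PySem.Dict (List Int) (List Int)) (T : List Int → List Int)
    (hidx : ∀ x, idx.get? x = if T x = [] then none else some (T x)) :
    ∀ (fc : List (List Int)) (out : PySem.Dict (List Int) (List Int)) (x : List Int),
      (fc.foldl (fun out cell => match idx.get? cell with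
        | some lst => out.insert cell lst
        | none => out) out).get? x
        = if x ∈ fc ∧ T x ≠ [] then some (T x) else out.get? x := by
  intro fc
  induction fc with
  | nil => intro out x; simp
  | cons c t ih =>
    intro out x
    rw [List.foldl_cons]
    have hstep : (match idx.get? c with
        | some lst => out.insert c lst
        | none => out) = if T c = [] then out else out.insert c (T c) := by
      rw [hidx c]
      by_cases hc : T c = []
      · rw [if_pos hc, if_pos hc]
      · rw [if_neg hc, if_neg hc]
    rw [hstep]
    by_cases hc : T c = []
    · rw [if_pos hc, ih]
      by_cases hx : x = c
      · subst hx; simp [hc]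
      · simp [hx]
    · rw [if_neg hc, ih]
      by_cases hx : x = c
      · subst hx
        rw [PySem.Dict.get?_insert, if_pos rfl]
        have h1 : (x ∈ x :: t ∧ T x ≠ []) := ⟨List.mem_cons_self, hc⟩
        rw [if_pos h1]
        by_cases hm : x ∈ t ∧ T x ≠ []
        · rw [if_pos hm]
        · rw [if_neg hm]
      · rw [PySem.Dict.get?_insert, if_neg hx]
        have : (x ∈ c :: t) ↔ x ∈ t := by simp [hx]
        by_cases hm : x ∈ t ∧ T x ≠ []
        · rw [if_pos hm, if_pos ⟨this.mpr hm.1, hm.2⟩]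
        · rw [if_neg hm, if_neg (fun h => hm ⟨this.mp h.1, h.2⟩)]

theorem pvB_out_keys (idx : PySem.Dict (List Int) (List Int)) (T : List Int → List Int)
    (hidx : ∀ x, idx.get? x = if T x = [] then none else some (T x)) :
    ∀ (fc : List (List Int)) (out : PySem.Dict (List Int) (List Int)),
      (fc.foldl (fun out cell => match idx.get? cell with
        | some lst => out.insert cell lst
        | none => out) out).keys
        = PySem.Set.update out.keys (fc.filter (fun c => !decide (T c = []))) := by
  intro fc
  induction fc with
  | nil => intro out; simp [PySem.Set.update]
  | cons c t ih =>
    intro out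
    rw [List.foldl_cons]
    have hstep : (match idx.get? c with
        | some lst => out.insert c lst
        | none => out) = if T c = [] then out else out.insert c (T c) := by
      rw [hidx c]
      by_cases hc : T c = []
      · rw [if_pos hc, if_pos hc]
      · rw [if_neg hc, if_neg hc]
    rw [hstep, List.filter_cons]
    by_cases hc : T c = []
    · rw [if_pos hc, ih]
      simp [hc]
    · rw [if_neg hc, ih]
      have h1 : (!decide (T c = [])) = true := by simp [hc]
      rw [h1, if_pos rfl]
      rw [PySem.Set.update_cons]
      congr 1
      show (out.insert c (T c)).keys = PySem.Set.add out.keys c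
      by_cases hm : c ∈ out.keys
      · have hcont : out.contains c = true := by
          rw [PySem.Dict.contains_eq_decide_mem_keys]; simpa using hm
        rw [PySem.Dict.keys_insert_of_contains out _ hcont]
        simp [PySem.Set.add, hm]
      · have hcont : out.contains c = false := by
          rw [PySem.Dict.contains_eq_decide_mem_keys]; simpa using hm
        rw [PySem.Dict.keys_insert_of_not_contains out _ hcont]
        simp [PySem.Set.add]
        intro h
        exact absurd (by simpa [List.contains_iff_mem] using h) hm

theorem pv_ofList_filter (p : List Int → Bool) (l : List (List Int)) :
    PySem.Set.ofList (l.filter p) = (PySem.Set.ofList l).filter p := by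
  induction l using List.reverseRecOn with
  | nil => rfl
  | append_singleton init x ih =>
    have hR : PySem.Set.ofList (init ++ [x]) = PySem.Set.add (PySem.Set.ofList init) x := by
      rw [PySem.Set.ofList_append]; rfl
    rw [hR]
    by_cases hp : p x = true
    · have hL : (init ++ [x]).filter p = init.filter p ++ [x] := by
        simp [List.filter_append, hp]
      rw [hL]
      have hL2 : PySem.Set.ofList (init.filter p ++ [x])
          = PySem.Set.add (PySem.Set.ofList (init.filter p)) x := by
        rw [PySem.Set.ofList_append]; rfl
      rw [hL2, ih]
      by_cases hm : x ∈ PySem.Set.ofList init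
      · have hm2 : x ∈ (PySem.Set.ofList init).filter p := List.mem_filter.mpr ⟨hm, hp⟩
        simp [PySem.Set.add, hm, hm2]
      · have hm2 : x ∉ (PySem.Set.ofList init).filter p := fun h => hm (List.mem_filter.mp h).1
        simp [PySem.Set.add, hm, hm2, List.filter_append, hp]
    · have hL : (init ++ [x]).filter p = init.filter p := by
        simp [List.filter_append, hp]
      rw [hL, ih]
      by_cases hm : x ∈ PySem.Set.ofList init
      · simp [PySem.Set.add, hm]
      · simp [PySem.Set.add, hm, List.filter_append, hp]

-- ===== VERDICT (by name: the statement is the Claim_ definition above) =====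
theorem get_possible_steps_per_cell_py_spec : Claim_equal_get_possible_steps_per_cell_py := by
  intro _dict fc _dom
  unfold Spec_get_possible_steps_per_cell_py
  unfold get_possible_steps_per_cell_py get_possible_steps_per_cell_py_alt
  set d := PySem.Dict.ofList _dict with hd
  have hdnd : d.keys.Nodup := PySem.Dict.nodup_keys_ofList _dict
  have hind : (d.items.map (·.1)).Nodup := by simpa [PySem.Dict.keys] using hdnd
  -- A-side characterization
  obtain ⟨hget1, hkeys1⟩ := pvA_phase1_inv d fc [] PySem.Dict.empty
    (by intro x; simp [PySem.Dict.get?_empty]) (by rfl)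
  rw [List.nil_append] at hget1 hkeys1
  set ans1 := pvA_phase1 d fc with hans1
  have hget1' : ∀ x, ans1.get? x
      = if x ∈ fc then some (pvS d.items x) else none := by
    intro x
    rw [hans1]
    unfold pvA_phase1
    rw [hget1 x]
    by_cases hm : x ∈ fc
    · rw [if_pos hm, if_pos hm, pv_stepsK_eq d hdnd x]
    · rw [if_neg hm, if_neg hm]
  have hkeys1' : ans1.keys = PySem.Set.ofList fc := by
    rw [hans1]; exact hkeys1
  have hgetD1 : ∀ x, ans1.getD x [] = if x ∈ fc then pvS d.items x else [] := by
    intro x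
    rw [PySem.Dict.getD_eq_get?_getD, hget1' x]
    by_cases hm : x ∈ fc
    · rw [if_pos hm, if_pos hm]; rfl
    · rw [if_neg hm, if_neg hm]; rfl
  have hmemkeys : ∀ x, (x ∈ ans1.keys) ↔ x ∈ fc := by
    intro x; rw [hkeys1']; exact PySem.Set.mem_ofList fc x
  have hAget : ∀ x, (pvA_phase2 ans1).get? x
      = if x ∈ fc ∧ pvS d.items x ≠ [] then some (pvS d.items x) else none := by
    intro x
    unfold pvA_phase2
    rw [pvA_phase2_get? ans1.keys ans1 x, hget1' x, hgetD1 x]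
    by_cases hm : x ∈ fc
    · rw [if_pos hm, if_pos hm]
      by_cases he : pvS d.items x = []
      · rw [if_pos ⟨(hmemkeys x).mpr hm, he⟩, if_neg (fun h => h.2 he)]
      · rw [if_neg (fun h => he h.2), if_pos ⟨hm, he⟩]
    · rw [if_neg hm, if_neg hm]
      rw [if_neg (show ¬(x ∈ fc ∧ pvS d.items x ≠ []) from fun h => hm h.1)]
      split <;> rfl
  have hAkeys : (pvA_phase2 ans1).keys
      = (PySem.Set.ofList fc).filter (fun x => !decide (pvS d.items x = [])) := by
    unfold pvA_phase2
    rw [pvA_phase2_keys ans1.keys ans1, hkeys1']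
    apply List.filter_congr
    intro x hx
    have hm : x ∈ fc := (PySem.Set.mem_ofList fc x).mp hx
    have h1 : decide (x ∈ PySem.Set.ofList fc) = true := by
      simp [hx]
    rw [h1, hgetD1 x, if_pos hm]
    simp
  -- B-side characterization
  have hidx : ∀ x, (pvB_index d.items).get? x
      = if pvS d.items x = [] then none else some (pvS d.items x) := by
    intro x
    unfold pvB_index
    exact pvB_index_get? d.items hind x
  have hBget : ∀ x, (fc.foldl (fun out cell => match (pvB_index d.items).get? cell with
      | some lst => out.insert cell lst
      | none => out) PySem.Dict.empty).get? x
      = if x ∈ fc ∧ pvS d.items x ≠ [] then some (pvS d.items x) else none := by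
    intro x
    rw [pvB_out_get? (pvB_index d.items) (fun x => pvS d.items x) hidx fc PySem.Dict.empty x]
    rw [PySem.Dict.get?_empty]
  have hBkeys : (fc.foldl (fun out cell => match (pvB_index d.items).get? cell with
      | some lst => out.insert cell lst
      | none => out) PySem.Dict.empty).keys
      = (PySem.Set.ofList fc).filter (fun x => !decide (pvS d.items x = [])) := by
    rw [pvB_out_keys (pvB_index d.items) (fun x => pvS d.items x) hidx fc PySem.Dict.empty]
    have he : (PySem.Dict.empty : PySem.Dict (List Int) (List Int)).keys = [] := rfl
    rw [he, PySem.Set.update_nil_left, pv_ofList_filter]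
  -- combine: same keys, same lookups, both nodup ⇒ same items
  set A := pvA_phase2 ans1 with hA
  set B := fc.foldl (fun out cell => match (pvB_index d.items).get? cell with
      | some lst => out.insert cell lst
      | none => out) PySem.Dict.empty with hB
  have hK : A.keys = B.keys := by rw [hAkeys, hBkeys]
  have hndA : A.keys.Nodup := by
    rw [hAkeys]; exact (PySem.Set.nodup_ofList fc).filter _
  have hndB : B.keys.Nodup := by rw [← hK]; exact hndA
  show A.items = B.items
  rw [PySem.Dict.items_eq_map_keys A hndA [], PySem.Dict.items_eq_map_keys B hndB [], ← hK]
  apply List.map_congr_left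
  intro k _
  rw [PySem.Dict.getD_eq_get?_getD, PySem.Dict.getD_eq_get?_getD, hAget k, hBget k]
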